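-- pv_equiv track=rewrite | github.com/masanao-ohba/cchistory | backend/services/message_grouper.py | group_messages_by_user_thread
-- ===== SOURCE A (Python) =====
-- from typing import List, Dict, Any
--
-- def group_messages_by_user_thread(conversations: List[Dict[str, Any]]) -> List[List[Dict[str, Any]]]:
--     """
--     ユーザー発言からそれに対するアシスタント応答群までをグループ化
--
--     Args:
--         conversations: 会話メッセージのリスト
--
--     Returns:
--         グループ化されたメッセージのリスト（各グループはメッセージのリスト）
--
--     例:
--         [user1, assistant1, assistant2, user2, assistant3]
--         -> [[user1, assistant1, assistant2], [user2, assistant3]]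
--     """
--     groups = []
--     current_group = []
--
--     for conv in conversations:
--         if conv["type"] != "user":
--             current_group.append(conv)
--             continue
--
--         if current_group:
--             groups.append(current_group)
--         current_group = [conv]
--
--     # 最後のグループを追加
--     if current_group:
--         groups.append(current_group)
--
--     # アシスタントメッセージのみのグループを直前のグループに統合
--     filtered_groups = []
--     for group in groups:
--         # ユーザーメッセージが含まれていないグループ（アシスタントのみ）
--         if not any(msg["type"] == "user" for msg in group):
--             # 直前のグループに統合
--             if filtered_groups:
--                 filtered_groups[-1].extend(group)
--             # 直前のグループがない場合は破棄（孤立したアシスタントメッセージ）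
--         else:
--             filtered_groups.append(group)
--
--     return filtered_groups
-- ===== SOURCE B (Python) =====
-- def group_messages_by_user_thread(conversations):
--     results = []
--     current = None
--     for conv in conversations:
--         if conv["type"] == "user":
--             if current is not None:
--                 results.append(current)
--             current = [conv]
--         elif current is not None:
--             current.append(conv)
--     if current is not None:
--         results.append(current)
--     return results
-- ===== Notes on version B (the rewrite author's own statement) =====
-- stated objective: simpler
-- what changed: B fuses A's two phases (group-building pass plus a second pass merging/discarding assistant-only groups) into one pass with a None sentinel for the current group, discarding leading assistant messages as it goes.
import Mathlib
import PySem

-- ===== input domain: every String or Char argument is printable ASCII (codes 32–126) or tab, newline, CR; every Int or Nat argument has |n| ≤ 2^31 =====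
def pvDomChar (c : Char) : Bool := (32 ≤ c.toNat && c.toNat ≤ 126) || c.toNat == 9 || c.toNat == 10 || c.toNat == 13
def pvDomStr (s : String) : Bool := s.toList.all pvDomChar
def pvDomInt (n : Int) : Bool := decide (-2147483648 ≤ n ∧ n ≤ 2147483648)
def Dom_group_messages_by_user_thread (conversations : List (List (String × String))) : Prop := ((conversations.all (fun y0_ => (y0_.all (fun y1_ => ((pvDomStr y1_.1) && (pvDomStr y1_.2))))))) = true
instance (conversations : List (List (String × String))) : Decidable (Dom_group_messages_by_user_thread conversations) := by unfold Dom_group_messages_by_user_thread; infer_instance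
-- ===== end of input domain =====

-- B fuses A's two passes (grouping, then merging/discarding assistant-only groups) into a
-- single pass with an Option current-group sentinel; same return value, simpler decomposition.


-- ===== PORT A =====
-- conv["type"]: first-match lookup in the association list (KeyError = none, excluded by Pre_;
-- getD "" is only reached outside Pre_).
def pvIsUserA (conv : List (String × String)) : Bool :=
  (((conv.find? (fun p => p.1 == "type")).map (·.2)).getD "") == "user"

-- the loop body of A's first pass: state = (groups, current_group)
def pvStepA (s : List (List (List (String × String))) × List (List (String × String)))
    (conv : List (String × String)) :
    List (List (List (String × String))) × List (List (String × String)) :=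
  if pvIsUserA conv = false then (s.1, s.2 ++ [conv])
  else ((if s.2 ≠ [] then s.1 ++ [s.2] else s.1), [conv])

-- the loop body of A's second pass: filtered_groups, with filtered_groups[-1].extend(group)
def pvStepF (filtered : List (List (List (String × String))))
    (group : List (List (String × String))) : List (List (List (String × String))) :=
  if (group.any (fun msg => pvIsUserA msg)) = false then
    (if filtered ≠ [] then filtered.dropLast ++ [filtered.getLastD [] ++ group] else filtered)
  else filtered ++ [group]

def group_messages_by_user_thread (conversations : List (List (String × String))) :
    List (List (List (String × String))) :=
  let st := conversations.foldl pvStepA ([], [])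
  let groups := if st.2 ≠ [] then st.1 ++ [st.2] else st.1
  groups.foldl pvStepF []

-- ===== PORT B =====
-- B's single loop body: state = (results, current : Option group)
def pvStepB (s : List (List (List (String × String))) × Option (List (List (String × String))))
    (conv : List (String × String)) :
    List (List (List (String × String))) × Option (List (List (String × String))) :=
  if pvIsUserA conv then
    ((match s.2 with | some g => s.1 ++ [g] | none => s.1), some [conv])
  else (s.1, s.2.map (fun g => g ++ [conv]))

def group_messages_by_user_thread_alt (conversations : List (List (String × String))) :
    List (List (List (String × String))) :=
  let st := conversations.foldl pvStepB ([], none)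
  match st.2 with | some g => st.1 ++ [g] | none => st.1

-- ===== PRECONDITION & SPEC =====
-- Pre_ excludes exactly the inputs where a message lacks a "type" key, on which the Python A
-- (and B alike) raises KeyError.
def Pre_group_messages_by_user_thread (conversations : List (List (String × String))) : Prop :=
  ∀ conv ∈ conversations, (conv.find? (fun p => p.1 == "type")).isSome = true
instance (conversations : List (List (String × String))) : Decidable (Pre_group_messages_by_user_thread conversations) := by unfold Pre_group_messages_by_user_thread; infer_instance
def pvWitness_group_messages_by_user_thread : (List (List (String × String))) :=
  [[("type", "user"), ("text", "hi")], [("type", "assistant"), ("text", "yo")]]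

def Spec_group_messages_by_user_thread (conversations : List (List (String × String))) (out : List (List (List (String × String)))) : Prop := out = group_messages_by_user_thread_alt conversations
instance (conversations : List (List (String × String))) (out : List (List (List (String × String)))) : Decidable (Spec_group_messages_by_user_thread conversations out) := by unfold Spec_group_messages_by_user_thread; infer_instance

-- ===== CLAIM (what is proved, stated in full; the proofs are below) =====
def Claim_equal_group_messages_by_user_thread : Prop := ∀ (conversations : List (List (String × String))), Dom_group_messages_by_user_thread conversations → Pre_group_messages_by_user_thread conversations → Spec_group_messages_by_user_thread conversations (group_messages_by_user_thread conversations)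

-- ===== LEMMAS AND PROOFS =====

-- abbreviations used only in the proofs
def pvFinA (s : List (List (List (String × String))) × List (List (String × String))) :
    List (List (List (String × String))) :=
  if s.2 ≠ [] then s.1 ++ [s.2] else s.1

def pvFinB (s : List (List (List (String × String))) × Option (List (List (String × String)))) :
    List (List (List (String × String))) :=
  match s.2 with | some g => s.1 ++ [g] | none => s.1

-- L1: A's first pass only appends to the groups accumulator
theorem pvL1 (l : List (List (String × String)))
    (gs : List (List (List (String × String)))) (cur : List (List (String × String))) :
    pvFinA (l.foldl pvStepA (gs, cur)) = gs ++ pvFinA (l.foldl pvStepA ([], cur)) := by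
  induction l generalizing gs cur with
  | nil => by_cases h : cur = [] <;> simp [pvFinA, h]
  | cons c l ih =>
    by_cases hu : pvIsUserA c = false
    · simp only [List.foldl_cons, pvStepA, hu, if_pos]
      exact ih gs (cur ++ [c])
    · simp only [Bool.not_eq_false] at hu
      by_cases hc : cur = []
      · simp only [List.foldl_cons, pvStepA, hu, Bool.true_eq_false, if_false, hc, ne_eq,
          not_true_eq_false, ite_false]
        simpa using ih gs [c]
      · simp only [List.foldl_cons, pvStepA, hu, Bool.true_eq_false, if_false, ne_eq, hc,
          not_false_eq_true, ite_true]
        rw [ih (gs ++ [cur]) [c], List.nil_append, ih [cur] [c]]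
        simp

-- L2: with a nonempty current group the two loops keep equal observable state
theorem pvL2 (l : List (List (String × String)))
    (gs : List (List (List (String × String)))) (cur : List (List (String × String)))
    (hc : cur ≠ []) :
    pvFinA (l.foldl pvStepA (gs, cur)) = pvFinB (l.foldl pvStepB (gs, some cur)) := by
  induction l generalizing gs cur with
  | nil => simp [pvFinA, pvFinB, hc]
  | cons c l ih =>
    by_cases hu : pvIsUserA c = true
    · simp only [List.foldl_cons, pvStepA, pvStepB, hu, Bool.true_eq_false,
        if_false, ne_eq, hc, not_false_eq_true, if_true, ite_true]
      exact ih (gs ++ [cur]) [c] (by simp)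
    · simp only [Bool.not_eq_true] at hu
      simp only [List.foldl_cons, pvStepA, pvStepB, hu, Bool.false_eq_true,
        if_false, if_pos, Option.map_some]
      exact ih gs (cur ++ [c]) (by simp)

-- L3: every group B ever emits contains a user message
theorem pvL3 (l : List (List (String × String)))
    (gs : List (List (List (String × String)))) (o : Option (List (List (String × String))))
    (hgs : ∀ g ∈ gs, g.any pvIsUserA = true)
    (ho : ∀ g, o = some g → g.any pvIsUserA = true) :
    ∀ g ∈ pvFinB (l.foldl pvStepB (gs, o)), g.any pvIsUserA = true := by
  induction l generalizing gs o with
  | nil =>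
    cases o with
    | none => simpa [pvFinB] using hgs
    | some g0 =>
      intro g hg
      simp only [pvFinB, List.foldl_nil] at hg
      rcases List.mem_append.mp hg with h | h
      · exact hgs g h
      · simp only [List.mem_singleton] at h; exact h ▸ ho _ rfl
  | cons c l ih =>
    by_cases hu : pvIsUserA c = true
    · simp only [List.foldl_cons, pvStepB, hu, if_true, ite_true]
      apply ih
      · intro g hg
        cases o with
        | none => exact hgs g hg
        | some g0 =>
          rcases List.mem_append.mp hg with h | h
          · exact hgs g h
          · simp only [List.mem_singleton] at h; exact h ▸ ho _ rfl
      · intro g hg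
        injection hg with hg; subst hg
        simp [List.any_cons, ← hu]
    · simp only [Bool.not_eq_true] at hu
      simp only [List.foldl_cons, pvStepB, hu, Bool.false_eq_true, if_false]
      apply ih
      · exact hgs
      intro g hg
      cases o with
      | none => simp at hg
      | some g0 =>
        simp only [Option.map_some, Option.some.injEq] at hg; subst hg
        simp [List.any_append, ho g0 rfl]

-- L4: the second pass is the identity on groups that all contain a user message
theorem pvL4 (R filtered : List (List (List (String × String))))
    (h : ∀ g ∈ R, g.any pvIsUserA = true) :
    R.foldl pvStepF filtered = filtered ++ R := by
  induction R generalizing filtered with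
  | nil => simp
  | cons g R ih =>
    have hg : g.any pvIsUserA = true := h g (by simp)
    simp only [List.foldl_cons, pvStepF, hg, Bool.true_eq_false, if_false, ite_false]
    rw [ih (filtered ++ [g]) (fun g' hg' => h g' (by simp [hg']))]
    simp

-- Main lemma: processing any assistant-only prefix state, A's two passes = B's one pass
theorem pvMain (l : List (List (String × String))) (as : List (List (String × String)))
    (has : as.any pvIsUserA = false) :
    (pvFinA (l.foldl pvStepA ([], as))).foldl pvStepF []
      = pvFinB (l.foldl pvStepB ([], none)) := by
  induction l generalizing as with
  | nil =>
    by_cases h : as = []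
    · simp [pvFinA, pvFinB, h]
    · simp [pvFinA, pvFinB, h, pvStepF, has]
  | cons c l ih =>
    by_cases hu : pvIsUserA c = true
    · have hall : ∀ g ∈ pvFinB (l.foldl pvStepB (([] : List (List (List (String × String)))), some [c])),
          g.any pvIsUserA = true := by
        apply pvL3
        · simp
        · intro g hg; injection hg with hg; subst hg; simp [List.any_cons, hu]
      by_cases hc : as = []
      · simp only [List.foldl_cons, pvStepA, pvStepB, hu, Bool.true_eq_false,
          if_false, hc, ne_eq, not_true_eq_false, ite_false]
        rw [pvL2 l [] [c] (by simp)]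
        exact pvL4 _ [] hall
      · simp only [List.foldl_cons, pvStepA, pvStepB, hu, Bool.true_eq_false,
          if_false, ne_eq, hc, not_false_eq_true, ite_true, List.nil_append]
        rw [pvL1 l [as] [c], pvL2 l [] [c] (by simp)]
        have : ([as] ++ pvFinB (l.foldl pvStepB ([], some [c]))).foldl pvStepF []
            = pvFinB (l.foldl pvStepB ([], some [c]))  := by
          simp only [List.singleton_append, List.foldl_cons, pvStepF, has, ite_false, if_pos,
            ne_eq, not_true_eq_false, if_false]
          exact pvL4 _ [] hall
        simpa using this
    · simp only [Bool.not_eq_true] at hu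
      simp only [List.foldl_cons, pvStepA, pvStepB, hu, Bool.false_eq_true,
        if_false, if_pos, Option.map_none]
      exact ih (as ++ [c]) (by simp [List.any_append, has, hu])

-- ===== VERDICT (by name: the statement is the Claim_ definition above) =====
theorem group_messages_by_user_thread_spec : Claim_equal_group_messages_by_user_thread := by
  intro conversations _ _
  unfold Spec_group_messages_by_user_thread group_messages_by_user_thread
    group_messages_by_user_thread_alt
  exact pvMain conversations [] rfl
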